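-- pv_equiv track=rewrite | github.com/pinetreelch/programmers | LV1./복습/유연근무연구/2_유연근무제_복습_2.py | solution
-- ===== SOURCE A (Python) =====
-- def solution(schedules, timelogs, startday):
--
--     answer = 0
--     result = []
--
--     start_day_set = startday
--
--     for log in timelogs:
--         for time in schedules:
--             # time  => 직원의 희망 시간
--
--             time_late = time + 10  # 직원들 이 시간 보다 늦으면 지각임
--             result_p = []
--             startday = start_day_set
--
--             for log_real in log:
--                 if startday == 6 or startday == 7:
--                     result_p.append("O")
--                     startday += 1
--                     continue
--                 else:
--                     if log_real <= time_late:
--                         result_p.append("O")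
--                     else:
--                         result_p.append("X")
--                     startday += 1
--
--             if "X" not in result_p:
--                 answer += 1
--         break
--
--     return answer
-- ===== SOURCE B (Python) =====
-- def solution(schedules, timelogs, startday):
--     if not timelogs:
--         return 0
--     log = timelogs[0]
--     # collect the workday (non-weekend) log entries once
--     relevant = []
--     day = startday
--     for x in log:
--         if day != 6 and day != 7:
--             relevant.append(x)
--         day += 1
--     if not relevant:
--         return len(schedules)
--     threshold = max(relevant) - 10
--     return sum(1 for t in schedules if t >= threshold)
-- ===== Notes on version B (the rewrite author's own statement) =====
-- stated objective: faster
-- what changed: B aggregates the single relevant log into one lateness threshold (max of non-weekend entries minus 10) and counts schedules meeting it in a separate pass, instead of rebuilding a per-schedule O/X list in nested loops.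
import Mathlib
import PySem

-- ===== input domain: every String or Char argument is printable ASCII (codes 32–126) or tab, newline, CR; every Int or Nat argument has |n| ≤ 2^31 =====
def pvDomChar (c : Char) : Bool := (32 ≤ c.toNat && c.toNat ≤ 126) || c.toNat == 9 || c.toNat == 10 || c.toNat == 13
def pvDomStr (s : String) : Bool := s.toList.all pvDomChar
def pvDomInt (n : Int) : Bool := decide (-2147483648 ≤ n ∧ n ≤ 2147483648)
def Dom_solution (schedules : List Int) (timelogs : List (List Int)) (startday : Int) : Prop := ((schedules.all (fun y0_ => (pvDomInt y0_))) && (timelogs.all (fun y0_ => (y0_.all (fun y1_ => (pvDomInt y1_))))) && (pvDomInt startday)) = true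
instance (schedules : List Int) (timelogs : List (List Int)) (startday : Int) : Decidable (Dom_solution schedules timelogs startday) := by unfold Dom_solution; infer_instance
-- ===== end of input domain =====

-- B replaces A's nested per-schedule O/X list construction by one pass computing a single
-- lateness threshold (max of the first log's non-weekend entries minus 10) and a separate
-- counting pass over the schedules; objective: simpler.

-- ===== PORT A =====
-- The outer 'for log in timelogs' breaks at the end of its first iteration, so only the
-- head of timelogs (if any) is processed; the match below transcribes that.
def solution (schedules : List Int) (timelogs : List (List Int)) (startday : Int) : Int :=
  match timelogs with
  | [] => 0
  | log :: _ =>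
    schedules.foldl (fun answer time =>
      let time_late := time + 10
      let result_p := (log.foldl (fun (st : List String × Int) log_real =>
          if st.2 = 6 ∨ st.2 = 7 then (st.1 ++ ["O"], st.2 + 1)
          else if log_real ≤ time_late then (st.1 ++ ["O"], st.2 + 1)
          else (st.1 ++ ["X"], st.2 + 1)) ([], startday)).1
      if "X" ∈ result_p then answer else answer + 1) 0

-- ===== PORT B =====
def solution_alt (schedules : List Int) (timelogs : List (List Int)) (startday : Int) : Int :=
  match timelogs with
  | [] => 0
  | log :: _ =>
    let relevant := (log.foldl (fun (st : List Int × Int) x =>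
        (if st.2 ≠ 6 ∧ st.2 ≠ 7 then st.1 ++ [x] else st.1, st.2 + 1)) ([], startday)).1
    match PySem.List.max? relevant (fun x => x) with
    | none => (schedules.length : Int)
    | some m => schedules.foldl (fun a t => if m - 10 ≤ t then a + 1 else a) 0

-- ===== PRECONDITION & SPEC =====
def Spec_solution (schedules : List Int) (timelogs : List (List Int)) (startday : Int) (out : Int) : Prop := out = solution_alt schedules timelogs startday
instance (schedules : List Int) (timelogs : List (List Int)) (startday : Int) (out : Int) : Decidable (Spec_solution schedules timelogs startday out) := by unfold Spec_solution; infer_instance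

-- ===== CLAIM (what is proved, stated in full; the proofs are below) =====
def Claim_equal_solution : Prop := ∀ (schedules : List Int) (timelogs : List (List Int)) (startday : Int), Dom_solution schedules timelogs startday → Spec_solution schedules timelogs startday (solution schedules timelogs startday)

-- ===== LEMMAS AND PROOFS =====

/-- The non-weekend entries of a log starting on day `sd` (the list B collects). -/
def pvRel (log : List Int) (sd : Int) : List Int :=
  match log with
  | [] => []
  | x :: xs => if sd = 6 ∨ sd = 7 then pvRel xs (sd + 1) else x :: pvRel xs (sd + 1)

/-- B's accumulator fold computes `pvRel`. -/
theorem pvRel_fold (log : List Int) : ∀ (acc : List Int) (sd : Int),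
    (log.foldl (fun (st : List Int × Int) x =>
        (if st.2 ≠ 6 ∧ st.2 ≠ 7 then st.1 ++ [x] else st.1, st.2 + 1)) (acc, sd)).1
      = acc ++ pvRel log sd := by
  induction log with
  | nil => intro acc sd; simp [pvRel]
  | cons x xs ih =>
    intro acc sd
    by_cases h : sd = 6 ∨ sd = 7
    · have h' : ¬ (sd ≠ 6 ∧ sd ≠ 7) := by tauto
      simp only [List.foldl_cons, if_neg h', pvRel, if_pos h, ih]
    · have h' : sd ≠ 6 ∧ sd ≠ 7 := by tauto
      simp only [List.foldl_cons, if_pos h', pvRel, if_neg h, ih, List.append_assoc,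
        List.singleton_append]

/-- A's inner O/X fold contains an "X" iff some non-weekend entry exceeds `time + 10`. -/
theorem pvMemX (time : Int) (log : List Int) : ∀ (acc : List String) (sd : Int),
    ("X" ∈ (log.foldl (fun (st : List String × Int) log_real =>
        if st.2 = 6 ∨ st.2 = 7 then (st.1 ++ ["O"], st.2 + 1)
        else if log_real ≤ time + 10 then (st.1 ++ ["O"], st.2 + 1)
        else (st.1 ++ ["X"], st.2 + 1)) (acc, sd)).1)
      ↔ ("X" ∈ acc ∨ ∃ x ∈ pvRel log sd, time + 10 < x) := by
  induction log with
  | nil => intro acc sd; simp [pvRel]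
  | cons y ys ih =>
    intro acc sd
    by_cases h : sd = 6 ∨ sd = 7
    · simp only [List.foldl_cons, if_pos h, pvRel, ih]
      simp
    · by_cases hle : y ≤ time + 10
      · simp only [List.foldl_cons, if_neg h, if_pos hle, pvRel, ih]
        simp
        constructor
        · rintro (h1 | h2)
          · exact Or.inl h1
          · exact Or.inr (Or.inr h2)
        · rintro (h1 | h2 | h3)
          · exact Or.inl h1
          · omega
          · exact Or.inr h3
      · simp only [List.foldl_cons, if_neg h, if_neg hle, pvRel, ih]
        have hy : time + 10 < y := by omega
        simp [hy]

theorem pvCountAll (l : List Int) : ∀ (a : Int),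
    l.foldl (fun a (_ : Int) => a + 1) a = a + l.length := by
  induction l with
  | nil => intro a; simp
  | cons x xs ih => intro a; simp [List.foldl_cons, ih]; omega

-- ===== VERDICT (by name: the statement is the Claim_ definition above) =====
theorem solution_spec : Claim_equal_solution := by
  intro schedules timelogs startday _
  unfold Spec_solution solution solution_alt
  match timelogs with
  | [] => rfl
  | log :: rest =>
    simp only []
    rw [pvRel_fold]
    simp only [List.nil_append]
    rcases hm : PySem.List.max? (pvRel log startday) (fun x => x) with _ | m
    · -- relevant empty: every schedule counts
      have hnil : pvRel log startday = [] := (PySem.List.max?_eq_none_iff _ _).mp hm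
      have hstep : ∀ (a : Int), ∀ time ∈ schedules,
          (if "X" ∈ (log.foldl (fun (st : List String × Int) log_real =>
              if st.2 = 6 ∨ st.2 = 7 then (st.1 ++ ["O"], st.2 + 1)
              else if log_real ≤ time + 10 then (st.1 ++ ["O"], st.2 + 1)
              else (st.1 ++ ["X"], st.2 + 1)) ([], startday)).1 then a else a + 1)
            = a + 1 := by
        intro a time _
        rw [if_neg]
        rw [pvMemX]
        simp [hnil]
      rw [PySem.List.foldl_congr_mem schedules _ (fun (a : Int) (_ : Int) => a + 1) 0 hstep]
      rw [pvCountAll]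
      simp
    · -- relevant nonempty with maximum m: A's no-"X" test is exactly m - 10 ≤ time
      have hmem := PySem.List.max?_mem hm
      have hmax := PySem.List.max?_isMax hm
      have hstep : ∀ (a : Int), ∀ time ∈ schedules,
          (if "X" ∈ (log.foldl (fun (st : List String × Int) log_real =>
              if st.2 = 6 ∨ st.2 = 7 then (st.1 ++ ["O"], st.2 + 1)
              else if log_real ≤ time + 10 then (st.1 ++ ["O"], st.2 + 1)
              else (st.1 ++ ["X"], st.2 + 1)) ([], startday)).1 then a else a + 1)
            = (if m - 10 ≤ time then a + 1 else a) := by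
        intro a time _
        have hiff : ("X" ∈ (log.foldl (fun (st : List String × Int) log_real =>
            if st.2 = 6 ∨ st.2 = 7 then (st.1 ++ ["O"], st.2 + 1)
            else if log_real ≤ time + 10 then (st.1 ++ ["O"], st.2 + 1)
            else (st.1 ++ ["X"], st.2 + 1)) ([], startday)).1)
            ↔ ¬ (m - 10 ≤ time) := by
          rw [pvMemX]
          constructor
          · rintro (h1 | ⟨x, hx, hlt⟩)
            · simp at h1
            · have := hmax x hx
              simp only at this
              omega
          · intro h
            exact Or.inr ⟨m, hmem, by omega⟩
        by_cases hc : m - 10 ≤ time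
        · rw [if_neg (fun h => (hiff.mp h) hc), if_pos hc]
        · rw [if_pos (hiff.mpr hc), if_neg hc]
      rw [PySem.List.foldl_congr_mem schedules _
        (fun (a t : Int) => if m - 10 ≤ t then a + 1 else a) 0 hstep]
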